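-- pv_equiv track=rewrite | github.com/atholcomb/pycodechallenges | ascii_capitalize.py | ascii_capitalize
-- ===== SOURCE A (Python) =====
-- def ascii_capitalize(string):
--     string = string.lower()
--     ascii_values = []
--     new_string = []
--
--     for char in string:
--         ascii_values.append(ord(char))
--
--     for av in ascii_values:
--         if av % 2 == 0:
--             new_string.append(chr(av).upper())
--         else:
--             new_string.append(chr(av))
--
--     return ''.join(new_string)
-- ===== SOURCE B (Python) =====
-- def ascii_capitalize(string):
--     string = string.lower()
--     table = {ord(c): c.upper() for c in set(string) if ord(c) % 2 == 0}
--     return string.translate(table)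
-- ===== Notes on version B (the rewrite author's own statement) =====
-- stated objective: idiomatic
-- what changed: Replaces the two explicit per-character loops (collect ords, then rebuild char by char) with a translation table precomputed over the distinct even-ord characters and a single str.translate pass.
import Mathlib
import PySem

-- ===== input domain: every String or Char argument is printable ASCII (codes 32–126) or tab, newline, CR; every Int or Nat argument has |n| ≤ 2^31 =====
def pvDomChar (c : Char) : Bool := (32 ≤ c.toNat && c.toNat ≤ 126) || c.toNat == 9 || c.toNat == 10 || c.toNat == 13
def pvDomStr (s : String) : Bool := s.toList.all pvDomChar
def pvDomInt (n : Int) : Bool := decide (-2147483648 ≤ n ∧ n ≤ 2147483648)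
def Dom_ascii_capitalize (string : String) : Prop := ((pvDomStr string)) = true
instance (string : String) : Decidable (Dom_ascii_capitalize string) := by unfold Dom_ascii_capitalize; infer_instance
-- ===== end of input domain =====

-- B replaces A's two explicit per-character loops by a precomputed even-ord translation table and one translate pass (idiomatic).


-- ===== PORT A =====
def ascii_capitalize (string : String) : String :=
  let s := PySem.Str.lower string
  let ascii_values := s.toList.foldl (fun acc char => acc ++ [char.toNat]) []
  let new_string := ascii_values.foldl
    (fun acc av =>
      if av % 2 == 0 then acc ++ [PySem.Chars.upperChar (Char.ofNat av)]
      else acc ++ [Char.ofNat av]) []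
  String.ofList new_string

-- ===== PORT B =====
def ascii_capitalize_alt (string : String) : String :=
  let s := PySem.Str.lower string
  let table : PySem.Dict Nat Char :=
    ((PySem.Set.ofList s.toList).filter (fun c => c.toNat % 2 == 0)).foldl
      (fun d c => d.insert c.toNat (PySem.Chars.upperChar c)) PySem.Dict.empty
  String.ofList (s.toList.map (fun c => (table.get? c.toNat).getD c))

-- ===== PRECONDITION & SPEC =====
def Spec_ascii_capitalize (string : String) (out : String) : Prop := out = ascii_capitalize_alt string
instance (string : String) (out : String) : Decidable (Spec_ascii_capitalize string out) := by unfold Spec_ascii_capitalize; infer_instance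

-- ===== CLAIM (what is proved, stated in full; the proofs are below) =====
def Claim_equal_ascii_capitalize : Prop := ∀ (string : String), Dom_ascii_capitalize string → Spec_ascii_capitalize string (ascii_capitalize string)

-- ===== LEMMAS AND PROOFS =====

lemma char_toNat_inj {a b : Char} (h : a.toNat = b.toNat) : a = b := by
  apply Char.ext
  exact UInt32.toNat_inj.mp h

lemma table_getD (l : List Char) (d : PySem.Dict Nat Char) (c : Char) :
    ((l.foldl (fun (d : PySem.Dict Nat Char) c => d.insert c.toNat (PySem.Chars.upperChar c)) d).get? c.toNat).getD c
      = if c ∈ l then PySem.Chars.upperChar c else (d.get? c.toNat).getD c := by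
  induction l generalizing d with
  | nil => simp
  | cons a l ih =>
    simp only [List.foldl_cons, ih, List.mem_cons]
    by_cases hl : c ∈ l
    · simp [hl]
    · by_cases hca : c = a
      · subst hca; simp [hl, PySem.Dict.get?_insert_self]
      · have hne : c.toNat ≠ a.toNat := fun h => hca (char_toNat_inj h)
        simp [hl, hca, PySem.Dict.get?_insert, hne]

lemma per_char (s : List Char) (c : Char) (hc : c ∈ s) :
    (((((PySem.Set.ofList s).filter (fun c => c.toNat % 2 == 0)).foldl
        (fun (d : PySem.Dict Nat Char) c => d.insert c.toNat (PySem.Chars.upperChar c)) PySem.Dict.empty).get? c.toNat).getD c)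
      = if c.toNat % 2 == 0 then PySem.Chars.upperChar c else c := by
  rw [table_getD]
  have hmem : c ∈ ((PySem.Set.ofList s).filter (fun c => c.toNat % 2 == 0)) ↔ (c.toNat % 2 == 0) := by
    simp [List.mem_filter, PySem.Set.mem_ofList, hc]
  by_cases h : (c.toNat % 2 == 0 : Bool) = true
  · simp [hmem.mpr h, h]
  · have : c ∉ ((PySem.Set.ofList s).filter (fun c => c.toNat % 2 == 0)) := fun hm => h (hmem.mp hm)
    simp [this, h, PySem.Dict.get?_empty]

lemma foldl_append_map {α β : Type} (l : List α) (f : α → β) (acc : List β) :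
    l.foldl (fun acc x => acc ++ [f x]) acc = acc ++ l.map f := by
  induction l generalizing acc with
  | nil => simp
  | cons a l ih => simp [ih]

lemma foldl_ite_append {α β : Type} (p : α → Bool) (g h : α → β) (l : List α) (acc : List β) :
    l.foldl (fun acc x => if p x then acc ++ [g x] else acc ++ [h x]) acc
      = acc ++ l.map (fun x => if p x then g x else h x) := by
  induction l generalizing acc with
  | nil => simp
  | cons a l ih =>
    by_cases hp : p a <;> simp [hp, ih]

-- ===== VERDICT (by name: the statement is the Claim_ definition above) =====
theorem ascii_capitalize_spec : Claim_equal_ascii_capitalize := by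
  intro string _
  unfold Spec_ascii_capitalize ascii_capitalize ascii_capitalize_alt
  simp only [foldl_append_map, foldl_ite_append, List.nil_append, List.map_map]
  congr 1
  apply List.map_congr_left
  intro c hc
  rw [per_char _ c hc]
  simp [Char.ofNat_toNat]
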